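-- pv_equiv track=rewrite | github.com/mdallman/adventOfCode2015Python | 05.dayFive.py | containsLetters
-- ===== SOURCE A (Python) =====
-- def containsLetters(aString):
--     letters = ['ab','cd','pq','xy']
--     n = len(aString)
--     x = 0
--
--
--     while x < n:
--         for l in letters:
--             if aString[x:x+2] == l:
--                 return True
--         x += 1
--     return False
-- ===== SOURCE B (Python) =====
-- def containsLetters(aString):
--     return any(p in aString for p in ['ab', 'cd', 'pq', 'xy'])
-- ===== Notes on version B (the rewrite author's own statement) =====
-- stated objective: idiomatic
-- what changed: Replaced the position-outer while loop comparing 2-char slices against each pattern with a pattern-outer any() using Python's built-in substring membership test.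
import Mathlib
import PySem

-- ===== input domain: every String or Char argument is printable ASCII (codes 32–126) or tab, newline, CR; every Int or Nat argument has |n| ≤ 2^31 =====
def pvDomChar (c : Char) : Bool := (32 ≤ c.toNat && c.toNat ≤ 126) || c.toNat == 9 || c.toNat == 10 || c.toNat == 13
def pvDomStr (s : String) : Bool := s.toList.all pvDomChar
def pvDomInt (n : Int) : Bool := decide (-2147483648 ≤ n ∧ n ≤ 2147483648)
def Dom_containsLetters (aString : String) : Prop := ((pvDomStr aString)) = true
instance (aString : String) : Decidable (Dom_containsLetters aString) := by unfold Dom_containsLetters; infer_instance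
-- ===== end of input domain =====

-- B replaces A's position-outer slice-comparison loop with a pattern-outer substring-membership test (idiomatic; same cost).

-- ===== PORT A =====
-- while x < n: for l in letters: if aString[x:x+2] == l: return True; x += 1
def containsLettersGo (cs : List Char) (letters : List (List Char)) (n x : Nat) : Bool :=
  if x < n then
    if letters.any (fun l => PySem.List.slice cs (some (x : Int)) (some ((x : Int) + 2)) == l) then
      true
    else
      containsLettersGo cs letters n (x + 1)
  else false
termination_by n - x

def containsLetters (aString : String) : Bool :=
  containsLettersGo aString.toList [['a','b'], ['c','d'], ['p','q'], ['x','y']]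
    (PySem.Str.len aString).toNat 0

-- ===== PORT B =====
def containsLetters_alt (aString : String) : Bool :=
  ["ab", "cd", "pq", "xy"].any (fun p => PySem.Str.isIn p aString)

-- ===== PRECONDITION & SPEC =====
def Spec_containsLetters (aString : String) (out : Bool) : Prop := out = containsLetters_alt aString
instance (aString : String) (out : Bool) : Decidable (Spec_containsLetters aString out) := by unfold Spec_containsLetters; infer_instance

-- ===== CLAIM (what is proved, stated in full; the proofs are below) =====
def Claim_equal_containsLetters : Prop := ∀ (aString : String), Dom_containsLetters aString → Spec_containsLetters aString (containsLetters aString)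

-- ===== LEMMAS AND PROOFS =====

theorem containsLettersGo_iff (cs : List Char) (letters : List (List Char)) :
    ∀ (n x : Nat), containsLettersGo cs letters n x = true ↔
      ∃ l ∈ letters, ∃ j : Nat, x ≤ j ∧ j < n ∧
        PySem.List.slice cs (some (j : Int)) (some ((j : Int) + 2)) = l := by
  intro n x
  fun_induction containsLettersGo cs letters n x with
  | case1 x hx hany =>
    simp only [List.any_eq_true, beq_iff_eq] at hany
    obtain ⟨l, hl, hsl⟩ := hany
    simp only [true_iff]
    exact ⟨l, hl, x, le_refl x, hx, hsl⟩
  | case2 x hx hany ih =>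
    simp only [List.any_eq_true, beq_iff_eq] at hany
    rw [ih]
    constructor
    · rintro ⟨l, hl, j, hj1, hj2, hj3⟩
      exact ⟨l, hl, j, by omega, hj2, hj3⟩
    · rintro ⟨l, hl, j, hj1, hj2, hj3⟩
      refine ⟨l, hl, j, ?_, hj2, hj3⟩
      rcases Nat.eq_or_lt_of_le hj1 with h | h
      · exact absurd ⟨l, hl, h ▸ hj3⟩ hany
      · omega
  | case3 x hx =>
    constructor
    · intro h; exact absurd h (by simp)
    · rintro ⟨l, hl, j, hj1, hj2, hj3⟩
      exact absurd (by omega : x < n) hx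

theorem pattern_iff (cs l : List Char) (hl : l.length = 2) :
    (∃ j : Nat, j < cs.length ∧
        PySem.List.slice cs (some (j : Int)) (some ((j : Int) + 2)) = l) ↔
      PySem.Chars.isIn l cs = true := by
  have hsl : ∀ j : Nat, PySem.List.slice cs (some (j : Int)) (some ((j : Int) + 2))
      = (cs.drop j).take 2 := by
    intro j
    have h2 : ((j : Int) + 2) = (((j + 2 : Nat)) : Int) := by push_cast; ring
    rw [h2, PySem.List.slice_natCast]
    congr 1
    omega
  rw [← PySem.Chars.exists_prefix_drop_iff_isIn]
  constructor
  · rintro ⟨j, hj, hsj⟩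
    rw [hsl j] at hsj
    exact ⟨j, hsj ▸ List.take_prefix 2 (cs.drop j)⟩
  · rintro ⟨j, hj⟩
    have hne : cs.drop j ≠ [] := by
      rintro h
      rw [h] at hj
      have := List.prefix_nil.mp hj
      simp [this] at hl
    have hjlt : j < cs.length := by
      by_contra h
      exact hne (List.drop_eq_nil_of_le (by omega))
    have htake : l = (cs.drop j).take l.length := List.prefix_iff_eq_take.mp hj
    refine ⟨j, hjlt, ?_⟩
    rw [hsl j, ← hl, ← htake]

-- ===== VERDICT (by name: the statement is the Claim_ definition above) =====
theorem containsLetters_spec : Claim_equal_containsLetters := by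
  intro s _
  unfold Spec_containsLetters containsLetters containsLetters_alt
  rw [Bool.eq_iff_iff, containsLettersGo_iff]
  simp only [PySem.Str.isIn_eq, List.any_cons, List.any_nil,
    Bool.or_eq_true, Bool.or_false]
  have hn : (PySem.Str.len s).toNat = s.toList.length := by
    simp [PySem.Str.len_eq]
  rw [hn]
  constructor
  · rintro ⟨l, hl, j, _, hj2, hj3⟩
    have hmem : ∃ j : Nat, j < s.toList.length ∧
        PySem.List.slice s.toList (some (j : Int)) (some ((j : Int) + 2)) = l := ⟨j, hj2, hj3⟩
    fin_cases hl
    · exact Or.inl ((pattern_iff s.toList _ (by decide)).mp hmem)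
    · exact Or.inr (Or.inl ((pattern_iff s.toList _ (by decide)).mp hmem))
    · exact Or.inr (Or.inr (Or.inl ((pattern_iff s.toList _ (by decide)).mp hmem)))
    · exact Or.inr (Or.inr (Or.inr ((pattern_iff s.toList _ (by decide)).mp hmem)))
  · rintro (h | h | h | h) <;>
    · obtain ⟨j, hj, hsl⟩ := (pattern_iff s.toList _ (by decide)).mpr h
      exact ⟨_, by simp, j, Nat.zero_le j, hj, hsl⟩
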